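-- pv_equiv track=rewrite | github.com/dept-info-iut-dijon/BUT3-S5-TeamErable-GoGoGo | app/views/ranking/global_ranking.py | _merge_player_history
-- ===== SOURCE A (Python) =====
-- def _merge_player_history(history: list[(int, bool)])->dict:
--     '''
--         Trie l'historique des parties classees par joueur
--
--         Args:
--             history(list[(int, bool)]): liste des victoires et defaites de chaque joueur concerne
--
--         Returns:
--             dict: historiques de chaque joueur (nb total parties et victoires)
--     '''
--     merged_history = {}
--     for record in history:
--         if record[0] not in merged_history:
--             merged_history[record[0]] = [int(record[1]), 1]
--         else:
--             merged_history[record[0]][0] += int(record[1])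
--             merged_history[record[0]][1] += 1
--     return merged_history
-- ===== SOURCE B (Python) =====
-- def _merge_player_history(history: list[(int, bool)])->dict:
--     order = list(dict.fromkeys(pid for pid, _ in history))
--     return {
--         pid: [sum(1 for p, w in history if p == pid and w),
--               sum(1 for p, _ in history if p == pid)]
--         for pid in order
--     }
-- ===== Notes on version B (the rewrite author's own statement) =====
-- stated objective: simpler
-- what changed: Replaces the single branch-guarded dict-building loop with a declarative form: dedup the player ids in first-occurrence order, then build the result as a comprehension counting wins and games per id.
import Mathlib
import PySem

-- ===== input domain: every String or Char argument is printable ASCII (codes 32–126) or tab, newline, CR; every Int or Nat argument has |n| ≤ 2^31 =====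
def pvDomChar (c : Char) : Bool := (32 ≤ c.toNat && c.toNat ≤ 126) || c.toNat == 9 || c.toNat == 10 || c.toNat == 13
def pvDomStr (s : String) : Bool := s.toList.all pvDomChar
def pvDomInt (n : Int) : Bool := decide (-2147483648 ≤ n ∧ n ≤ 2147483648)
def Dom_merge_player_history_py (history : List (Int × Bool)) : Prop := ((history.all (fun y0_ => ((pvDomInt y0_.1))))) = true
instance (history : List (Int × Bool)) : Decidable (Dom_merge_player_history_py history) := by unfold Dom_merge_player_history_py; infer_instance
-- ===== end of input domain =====

-- B replaces A's branch-guarded dict-building loop by a declarative form (dedup ids, then count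
-- wins and games per id); same result, different decomposition (objective: simpler).

-- ===== PORT A =====
-- one loop step of A: add record r to the merged dict (in-place list updates ported as List.set;
-- exact here since every stored value is a 2-element list)
def mergeStepA (d : PySem.Dict Int (List Int)) (r : Int × Bool) : PySem.Dict Int (List Int) :=
  if d.contains r.1 = false then
    d.insert r.1 [(if r.2 then (1 : Int) else 0), 1]
  else
    d.modify r.1 [] (fun v =>
      let v0 := v.set 0 (v.getD 0 0 + (if r.2 then (1 : Int) else 0))
      v0.set 1 (v0.getD 1 0 + 1))

def merge_player_history_py (history : List (Int × Bool)) : List (Int × List Int) :=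
  (history.foldl mergeStepA PySem.Dict.empty).items

-- ===== PORT B =====
def merge_player_history_py_alt (history : List (Int × Bool)) : List (Int × List Int) :=
  (PySem.List.dedup (history.map Prod.fst)).map (fun pid =>
    (pid, [ (history.countP (fun r => r.1 == pid && r.2) : Int),
            (history.countP (fun r => r.1 == pid) : Int) ]))

-- ===== PRECONDITION & SPEC =====
def Spec_merge_player_history_py (history : List (Int × Bool)) (out : List (Int × List Int)) : Prop := out = merge_player_history_py_alt history
instance (history : List (Int × Bool)) (out : List (Int × List Int)) : Decidable (Spec_merge_player_history_py history out) := by unfold Spec_merge_player_history_py; infer_instance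

-- ===== CLAIM (what is proved, stated in full; the proofs are below) =====
def Claim_equal_merge_player_history_py : Prop := ∀ (history : List (Int × Bool)), Dom_merge_player_history_py history → Spec_merge_player_history_py history (merge_player_history_py history)

-- ===== LEMMAS AND PROOFS =====

-- A's branch, split into two rewrite rules
theorem mergeStepA_modify (d : PySem.Dict Int (List Int)) (r : Int × Bool) (h : d.contains r.1 = true) :
    mergeStepA d r = d.modify r.1 [] (fun v =>
      let v0 := v.set 0 (v.getD 0 0 + (if r.2 then (1 : Int) else 0))
      v0.set 1 (v0.getD 1 0 + 1)) := by
  unfold mergeStepA; rw [h]; simp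

theorem mergeStepA_insert (d : PySem.Dict Int (List Int)) (r : Int × Bool) (h : d.contains r.1 = false) :
    mergeStepA d r = d.insert r.1 [(if r.2 then (1 : Int) else 0), 1] := by
  unfold mergeStepA; rw [h]; simp

-- PySem.List.dedup grows from the right by the set-add rule
theorem dedup_snoc (xs : List Int) (x : Int) :
    PySem.List.dedup (xs ++ [x]) = if x ∈ xs then PySem.List.dedup xs else PySem.List.dedup xs ++ [x] := by
  simp only [PySem.List.dedup]
  rw [PySem.Set.ofList_append_singleton, PySem.Set.add_eq_ite]
  simp [PySem.Set.mem_ofList]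

-- A's loop tests membership via contains; expressed on the processed prefix
theorem mergeA_contains (hs : List (Int × Bool))
    (hk : (hs.foldl mergeStepA PySem.Dict.empty).keys = PySem.List.dedup (hs.map Prod.fst)) (k : Int) :
    (hs.foldl mergeStepA PySem.Dict.empty).contains k = decide (k ∈ hs.map Prod.fst) := by
  rw [PySem.Dict.contains_eq_decide_mem_keys, hk]
  simp

-- the dict built by A's loop, characterised: keys
theorem mergeA_keys (hs : List (Int × Bool)) :
    (hs.foldl mergeStepA PySem.Dict.empty).keys = PySem.List.dedup (hs.map Prod.fst) := by
  induction hs using List.reverseRecOn with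
  | nil => rfl
  | append_singleton hs r ih =>
    rw [List.foldl_append, List.foldl_cons, List.foldl_nil, List.map_append, List.map_cons,
        List.map_nil, dedup_snoc]
    have hc := mergeA_contains hs ih r.1
    by_cases hm : r.1 ∈ hs.map Prod.fst
    · rw [if_pos hm, mergeStepA_modify _ _ (by rw [hc]; exact decide_eq_true hm),
          PySem.Dict.keys_modify, PySem.Dict.keys_insert_of_contains _ _ (by rw [hc]; exact decide_eq_true hm), ih]
    · rw [if_neg hm, mergeStepA_insert _ _ (by rw [hc]; exact decide_eq_false hm),
          PySem.Dict.keys_insert_of_not_contains _ _ (by rw [hc]; exact decide_eq_false hm), ih]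

-- for a foreign key, appending one record changes neither membership nor the counts
theorem target_snoc_ne (hs : List (Int × Bool)) (r : Int × Bool) (p : Int) (hp : p ≠ r.1) :
    (if p ∈ (hs ++ [r]).map Prod.fst then
        [ (((hs ++ [r]).countP (fun x => x.1 == p && x.2)) : Int), (((hs ++ [r]).countP (fun x => x.1 == p)) : Int) ]
      else ([] : List Int)) =
    (if p ∈ hs.map Prod.fst then
        [ ((hs.countP (fun x => x.1 == p && x.2)) : Int), ((hs.countP (fun x => x.1 == p)) : Int) ]
      else ([] : List Int)) := by
  have h1 : (r.1 == p) = false := by simp [Ne.symm hp]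
  simp [List.countP_append, h1, hp]

-- the dict built by A's loop, characterised: lookups carry the win/total counts of the prefix
theorem mergeA_getD (hs : List (Int × Bool)) (p : Int) :
    (hs.foldl mergeStepA PySem.Dict.empty).getD p [] =
      if p ∈ hs.map Prod.fst then
        [ (hs.countP (fun x => x.1 == p && x.2) : Int), (hs.countP (fun x => x.1 == p) : Int) ]
      else [] := by
  induction hs using List.reverseRecOn with
  | nil => rfl
  | append_singleton hs r ih =>
    rw [List.foldl_append, List.foldl_cons, List.foldl_nil]
    have hc := mergeA_contains hs (mergeA_keys hs) r.1
    by_cases hp : p = r.1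
    · subst hp
      by_cases hm : r.1 ∈ hs.map Prod.fst
      · rw [mergeStepA_modify _ _ (by rw [hc]; exact decide_eq_true hm),
            PySem.Dict.getD_modify, if_pos rfl, ih, if_pos hm,
            if_pos (by simp : r.1 ∈ (hs ++ [r]).map Prod.fst)]
        simp [List.countP_append]
      · rw [mergeStepA_insert _ _ (by rw [hc]; exact decide_eq_false hm),
            PySem.Dict.getD_insert, if_pos rfl, if_pos (by simp : r.1 ∈ (hs ++ [r]).map Prod.fst)]
        have hw : hs.countP (fun x => x.1 == r.1 && x.2) = 0 :=
          List.countP_eq_zero.mpr (fun x hx => by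
            simp only [Bool.and_eq_true, beq_iff_eq, not_and]
            intro h1; exact absurd (h1 ▸ List.mem_map_of_mem hx) hm)
        have ht : hs.countP (fun x => x.1 == r.1) = 0 :=
          List.countP_eq_zero.mpr (fun x hx => by
            simp only [beq_iff_eq]
            intro h1; exact absurd (h1 ▸ List.mem_map_of_mem hx) hm)
        simp [List.countP_append, hw, ht]
    · by_cases hm : r.1 ∈ hs.map Prod.fst
      · rw [mergeStepA_modify _ _ (by rw [hc]; exact decide_eq_true hm),
            PySem.Dict.getD_modify, if_neg hp, ih, target_snoc_ne hs r p hp]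
      · rw [mergeStepA_insert _ _ (by rw [hc]; exact decide_eq_false hm),
            PySem.Dict.getD_insert, if_neg hp, ih, target_snoc_ne hs r p hp]

-- ===== VERDICT (by name: the statement is the Claim_ definition above) =====
theorem merge_player_history_py_spec : Claim_equal_merge_player_history_py := by
  intro history _
  unfold Spec_merge_player_history_py merge_player_history_py merge_player_history_py_alt
  have hnd : (history.foldl mergeStepA PySem.Dict.empty).keys.Nodup := by
    rw [mergeA_keys]; exact PySem.List.nodup_dedup _
  rw [PySem.Dict.items_eq_map_keys _ hnd ([] : List Int), mergeA_keys]
  apply List.map_congr_left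
  intro p hp
  rw [mergeA_getD, if_pos ((PySem.List.mem_dedup _ p).mp hp)]
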